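-- pv_equiv track=rewrite | github.com/tryingtosurviven/secrets-rotation-automator | app.py | _extract_affected_services
-- ===== SOURCE A (Python) =====
-- from typing import Dict, List, Optional, Tuple, Any
--
-- def _extract_affected_services(files: List[Dict]) -> List[str]:
--     """
--     Extract affected services from file paths.
--
--     Args:
--         files: List of file dictionaries with file_path
--
--     Returns:
--         List[str]: List of affected service names
--     """
--     services = set()
--
--     for file_info in files:
--         file_path = file_info.get('file_path', '')
--
--         # Extract service name from path
--         if 'auth' in file_path.lower():
--             services.add('Authentication')
--         if 'payment' in file_path.lower():
--             services.add('Payment')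
--         if 'api' in file_path.lower():
--             services.add('API')
--         if 'database' in file_path.lower() or 'db' in file_path.lower():
--             services.add('Database')
--         if 'config' in file_path.lower():
--             services.add('Configuration')
--         if 'k8s' in file_path.lower() or 'kubernetes' in file_path.lower():
--             services.add('Kubernetes')
--         if 'docker' in file_path.lower():
--             services.add('Docker')
--
--     return sorted(list(services)) if services else ['Unknown']
-- ===== SOURCE B (Python) =====
-- from typing import Dict, List, Optional, Tuple, Any
--
-- # Ordered (alphabetical) table of service name -> trigger keywords.
-- _SERVICE_TABLE = [
--     ('API', ['api']),
--     ('Authentication', ['auth']),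
--     ('Configuration', ['config']),
--     ('Database', ['database', 'db']),
--     ('Docker', ['docker']),
--     ('Kubernetes', ['k8s', 'kubernetes']),
--     ('Payment', ['payment']),
-- ]
--
-- def _extract_affected_services(files: List[Dict]) -> List[str]:
--     paths = [f.get('file_path', '').lower() for f in files]
--     result = [svc for svc, kws in _SERVICE_TABLE
--               if any(kw in p for p in paths for kw in kws)]
--     return result or ['Unknown']
-- ===== Notes on version B (the rewrite author's own statement) =====
-- stated objective: simpler
-- what changed: B replaces A's mutable set built by seven inline if-branches plus a final sort with a single filter over an alphabetically pre-ordered service-to-keywords table (outer loop over services, inner over the once-lowered paths), so no set and no sorting step remain.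
import Mathlib
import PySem

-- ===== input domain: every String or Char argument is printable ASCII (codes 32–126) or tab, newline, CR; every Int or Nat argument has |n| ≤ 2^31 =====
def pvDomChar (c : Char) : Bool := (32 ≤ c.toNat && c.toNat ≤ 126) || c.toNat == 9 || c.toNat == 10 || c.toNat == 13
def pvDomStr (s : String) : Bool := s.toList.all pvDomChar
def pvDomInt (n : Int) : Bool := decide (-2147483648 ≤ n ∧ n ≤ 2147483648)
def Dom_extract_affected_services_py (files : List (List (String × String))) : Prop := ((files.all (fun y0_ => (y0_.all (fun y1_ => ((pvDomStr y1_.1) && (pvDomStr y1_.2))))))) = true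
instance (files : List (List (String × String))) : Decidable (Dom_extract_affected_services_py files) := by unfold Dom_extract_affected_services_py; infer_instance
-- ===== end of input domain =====

-- B replaces A's set-plus-final-sort with a single filter over an alphabetically ordered
-- service→keywords table (objective: simpler; same asymptotic cost).


-- ===== PORT A =====
-- file_info.get('file_path', '') : first-match association-list lookup with default ''
def pvGetPath (file_info : List (String × String)) : String :=
  (((file_info.find? (fun p => p.1 == "file_path")).map Prod.snd).getD "")

-- the body of A's for-loop: seven conditional set.add's testing the lowered path
def pvStepA (services : PySem.Set String) (file_info : List (String × String)) : PySem.Set String :=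
  let file_path := pvGetPath file_info
  let services := if PySem.Str.isIn "auth" (PySem.Str.lower file_path) then PySem.Set.add services "Authentication" else services
  let services := if PySem.Str.isIn "payment" (PySem.Str.lower file_path) then PySem.Set.add services "Payment" else services
  let services := if PySem.Str.isIn "api" (PySem.Str.lower file_path) then PySem.Set.add services "API" else services
  let services := if PySem.Str.isIn "database" (PySem.Str.lower file_path) || PySem.Str.isIn "db" (PySem.Str.lower file_path) then PySem.Set.add services "Database" else services
  let services := if PySem.Str.isIn "config" (PySem.Str.lower file_path) then PySem.Set.add services "Configuration" else services
  let services := if PySem.Str.isIn "k8s" (PySem.Str.lower file_path) || PySem.Str.isIn "kubernetes" (PySem.Str.lower file_path) then PySem.Set.add services "Kubernetes" else services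
  let services := if PySem.Str.isIn "docker" (PySem.Str.lower file_path) then PySem.Set.add services "Docker" else services
  services

def extract_affected_services_py (files : List (List (String × String))) : List String :=
  let services : PySem.Set String := files.foldl pvStepA PySem.Set.empty
  if services = [] then ["Unknown"] else PySem.List.sorted services (fun x => x) false

-- ===== PORT B =====
def pvServiceTable : List (String × List String) :=
  [("API", ["api"]), ("Authentication", ["auth"]), ("Configuration", ["config"]),
   ("Database", ["database", "db"]), ("Docker", ["docker"]),
   ("Kubernetes", ["k8s", "kubernetes"]), ("Payment", ["payment"])]

def extract_affected_services_py_alt (files : List (List (String × String))) : List String :=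
  let paths := files.map (fun f => PySem.Str.lower (pvGetPath f))
  let result := (pvServiceTable.filter
    (fun sk => paths.any (fun p => sk.2.any (fun kw => PySem.Str.isIn kw p)))).map Prod.fst
  if result = [] then ["Unknown"] else result

-- ===== PRECONDITION & SPEC =====
def Spec_extract_affected_services_py (files : List (List (String × String))) (out : List String) : Prop := out = extract_affected_services_py_alt files
instance (files : List (List (String × String))) (out : List String) : Decidable (Spec_extract_affected_services_py files out) := by unfold Spec_extract_affected_services_py; infer_instance

-- ===== CLAIM (what is proved, stated in full; the proofs are below) =====
def Claim_equal_extract_affected_services_py : Prop := ∀ (files : List (List (String × String))), Dom_extract_affected_services_py files → Spec_extract_affected_services_py files (extract_affected_services_py files)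

-- ===== LEMMAS AND PROOFS =====

-- "file f triggers keyword list kws"
def pvHit1 (kws : List String) (f : List (String × String)) : Bool :=
  kws.any (fun kw => PySem.Str.isIn kw (PySem.Str.lower (pvGetPath f)))

-- "some file in files triggers keyword list kws"
def pvHit (kws : List String) (files : List (List (String × String))) : Bool :=
  files.any (fun f => pvHit1 kws f)

-- "service named s is triggered by file f / by some file in files"
def pvCond1 (f : List (String × String)) (s : String) : Prop :=
  ∃ sk ∈ pvServiceTable, sk.1 = s ∧ pvHit1 sk.2 f = true

def pvCond (files : List (List (String × String))) (s : String) : Prop :=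
  ∃ sk ∈ pvServiceTable, sk.1 = s ∧ pvHit sk.2 files = true

lemma pv_mem_addIf {b : Bool} {s : PySem.Set String} {x y : String} :
    y ∈ (if b then PySem.Set.add s x else s) ↔ y ∈ s ∨ (b = true ∧ y = x) := by
  cases b <;> simp [pysem]

lemma pv_nodup_add (s : PySem.Set String) (x : String) (h : List.Nodup s) :
    List.Nodup (PySem.Set.add s x) := by
  unfold PySem.Set.add PySem.Set.contains
  split <;> simp_all [List.nodup_append]
  intro a ha hax
  exact (by assumption : x ∉ s) (hax ▸ ha)

lemma pv_nodup_addIf (b : Bool) (s : PySem.Set String) (x : String) (h : List.Nodup s) :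
    List.Nodup (if b then PySem.Set.add s x else s) := by
  cases b <;> simp [pv_nodup_add, h]

set_option maxHeartbeats 1000000 in
lemma pv_mem_stepA (acc : PySem.Set String) (f : List (String × String)) (s : String) :
    s ∈ pvStepA acc f ↔ s ∈ acc ∨ pvCond1 f s := by
  simp only [pvStepA, pv_mem_addIf, pvCond1, pvHit1, pvServiceTable, List.mem_cons,
    List.not_mem_nil, or_false]
  constructor
  · rintro (((((((h | ⟨hb, rfl⟩) | ⟨hb, rfl⟩) | ⟨hb, rfl⟩) | ⟨hb, rfl⟩) | ⟨hb, rfl⟩) |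
      ⟨hb, rfl⟩) | ⟨hb, rfl⟩)
    · exact Or.inl h
    · exact Or.inr ⟨("Authentication", ["auth"]), Or.inr (Or.inl rfl), rfl, by simpa using hb⟩
    · exact Or.inr ⟨("Payment", ["payment"]), Or.inr (Or.inr (Or.inr (Or.inr (Or.inr (Or.inr rfl))))), rfl, by simpa using hb⟩
    · exact Or.inr ⟨("API", ["api"]), Or.inl rfl, rfl, by simpa using hb⟩
    · exact Or.inr ⟨("Database", ["database", "db"]), Or.inr (Or.inr (Or.inr (Or.inl rfl))), rfl, by simpa using hb⟩
    · exact Or.inr ⟨("Configuration", ["config"]), Or.inr (Or.inr (Or.inl rfl)), rfl, by simpa using hb⟩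
    · exact Or.inr ⟨("Kubernetes", ["k8s", "kubernetes"]), Or.inr (Or.inr (Or.inr (Or.inr (Or.inr (Or.inl rfl))))), rfl, by simpa using hb⟩
    · exact Or.inr ⟨("Docker", ["docker"]), Or.inr (Or.inr (Or.inr (Or.inr (Or.inl rfl)))), rfl, by simpa using hb⟩
  · rintro (h | ⟨sk, (rfl | rfl | rfl | rfl | rfl | rfl | rfl), hname, hb⟩)
    · exact Or.inl (Or.inl (Or.inl (Or.inl (Or.inl (Or.inl (Or.inl h))))))
    all_goals cases hname
    · exact Or.inl (Or.inl (Or.inl (Or.inl (Or.inr ⟨by simpa using hb, rfl⟩))))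
    · exact Or.inl (Or.inl (Or.inl (Or.inl (Or.inl (Or.inl (Or.inr ⟨by simpa using hb, rfl⟩))))))
    · exact Or.inl (Or.inl (Or.inr ⟨by simpa using hb, rfl⟩))
    · exact Or.inl (Or.inl (Or.inl (Or.inr ⟨by simpa using hb, rfl⟩)))
    · exact Or.inr ⟨by simpa using hb, rfl⟩
    · exact Or.inl (Or.inr ⟨by simpa using hb, rfl⟩)
    · exact Or.inl (Or.inl (Or.inl (Or.inl (Or.inl (Or.inr ⟨by simpa using hb, rfl⟩)))))

lemma pv_nodup_stepA (acc : PySem.Set String) (f : List (String × String)) (h : List.Nodup acc) :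
    List.Nodup (pvStepA acc f) := by
  simp only [pvStepA]
  repeat apply pv_nodup_addIf
  exact h

lemma pv_hit_cons (kws : List String) (f : List (String × String)) (rest : List (List (String × String))) :
    pvHit kws (f :: rest) = (pvHit1 kws f || pvHit kws rest) := by
  simp [pvHit]

lemma pv_cond_nil (s : String) : ¬ pvCond [] s := by
  rintro ⟨sk, _, _, hb⟩
  simp [pvHit] at hb

lemma pv_cond_cons (f : List (String × String)) (rest : List (List (String × String))) (s : String) :
    pvCond (f :: rest) s ↔ pvCond1 f s ∨ pvCond rest s := by
  simp only [pvCond, pvCond1, pv_hit_cons, Bool.or_eq_true]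
  constructor
  · rintro ⟨sk, h1, h2, h3 | h3⟩
    · exact Or.inl ⟨sk, h1, h2, h3⟩
    · exact Or.inr ⟨sk, h1, h2, h3⟩
  · rintro (⟨sk, h1, h2, h3⟩ | ⟨sk, h1, h2, h3⟩)
    · exact ⟨sk, h1, h2, Or.inl h3⟩
    · exact ⟨sk, h1, h2, Or.inr h3⟩

lemma pv_mem_foldA (files : List (List (String × String))) :
    ∀ acc s, s ∈ files.foldl pvStepA acc ↔ s ∈ acc ∨ pvCond files s := by
  induction files with
  | nil => intro acc s; simpa using fun h => (pv_cond_nil s h).elim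
  | cons f rest ih =>
    intro acc s
    rw [List.foldl_cons, ih, pv_mem_stepA, pv_cond_cons, or_assoc]

lemma pv_nodup_foldA (files : List (List (String × String))) :
    ∀ acc, List.Nodup acc → List.Nodup (files.foldl pvStepA acc) := by
  induction files with
  | nil => exact fun acc h => h
  | cons f rest ih => exact fun acc h => ih _ (pv_nodup_stepA acc f h)

-- membership of B's result list
lemma pv_mem_result (files : List (List (String × String))) (s : String) :
    s ∈ (pvServiceTable.filter (fun sk => pvHit sk.2 files)).map Prod.fst ↔ pvCond files s := by
  simp only [List.mem_map, List.mem_filter, pvCond]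
  constructor
  · rintro ⟨sk, ⟨h1, h2⟩, rfl⟩; exact ⟨sk, h1, rfl, h2⟩
  · rintro ⟨sk, h1, rfl, h2⟩; exact ⟨sk, ⟨h1, h2⟩, rfl⟩

-- B's filter predicate over the precomputed lowered paths is pvHit
lemma pv_filter_eq (files : List (List (String × String))) :
    pvServiceTable.filter
      (fun sk => (files.map (fun f => PySem.Str.lower (pvGetPath f))).any
        (fun p => sk.2.any (fun kw => PySem.Str.isIn kw p))) =
    pvServiceTable.filter (fun sk => pvHit sk.2 files) := by
  simp [List.any_map, pvHit, pvHit1, Function.comp_def]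

lemma pv_result_pairwise (files : List (List (String × String))) :
    ((pvServiceTable.filter (fun sk => pvHit sk.2 files)).map Prod.fst).Pairwise (· < ·) := by
  have hall : (pvServiceTable.map Prod.fst).Pairwise (· < ·) := by
    simp only [pvServiceTable, List.map_cons, List.map_nil]
    simp [String.lt_iff_toList_lt]
    decide
  exact hall.sublist (List.filter_sublist.map Prod.fst)

-- ===== VERDICT (by name: the statement is the Claim_ definition above) =====
theorem extract_affected_services_py_spec : Claim_equal_extract_affected_services_py := by
  intro files _
  show (let services : PySem.Set String := files.foldl pvStepA PySem.Set.empty;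
        if services = [] then ["Unknown"] else PySem.List.sorted services (fun x => x) false) =
       (let paths := files.map (fun f => PySem.Str.lower (pvGetPath f));
        let result := (pvServiceTable.filter
          (fun sk => paths.any (fun p => sk.2.any (fun kw => PySem.Str.isIn kw p)))).map Prod.fst;
        if result = [] then ["Unknown"] else result)
  simp only
  rw [pv_filter_eq]
  set S := files.foldl pvStepA PySem.Set.empty with hS
  set R := (pvServiceTable.filter (fun sk => pvHit sk.2 files)).map Prod.fst with hR
  have hmem : ∀ s, s ∈ S ↔ s ∈ R := fun s => by
    rw [hS, pv_mem_foldA files PySem.Set.empty s, hR, pv_mem_result]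
    simp [PySem.Set.empty]
  have hpair := pv_result_pairwise files
  have hperm : R.Perm S :=
    (List.perm_ext_iff_of_nodup hpair.nodup
      (pv_nodup_foldA files PySem.Set.empty (by simp [PySem.Set.empty]))).2
      (fun a => (hmem a).symm)
  have hsorted : PySem.List.sorted S (fun x => x) false = R :=
    PySem.List.sorted_eq_of_perm_of_pairwise_lt _ _ _ hperm hpair
  by_cases h : S = []
  · have hr : R = [] := (h ▸ hperm).eq_nil
    simp [h, hr]
  · have hr : R ≠ [] := fun hr0 => h (hr0 ▸ hperm.symm).eq_nil
    simp [h, hr, hsorted]
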